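-- pv_equiv track=rewrite | github.com/Vehshanaan/Dissertation2022 | codes/with_benchmark_v3/src/sites/sites/path_finding.py | init_algo
-- ===== SOURCE A (Python) =====
-- def init_algo(current_pos, path, plan_no_id):
--     # 返回：起点，修剪后的path，时间
--
--     if path and not plan_no_id: # 自己有计划但还没收到别人计划的场合：直接继续
--         start = path[-1]
--         path_for_return = path
--         cost = len(path)-1
--         return start, path_for_return, cost
--
--     elif path and plan_no_id: # 两个都不空的场合
--         start = current_pos  # 初始化起点
--         path_for_return = []  # 初始化用于返回的清洁路径
--         # 逐个检查收到的计划和自己的计划，如有冲突则剪掉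
--
--         min_length = min(len(path), len(plan_no_id))  # 获得自己计划和别人计划中的最小长度
--         cost = 0  # 初始化时间值
--         for i in range(min_length):
--             # 检查是否有碰撞，如果有就停止
--             my_pos = path[i]
--             others_pos = plan_no_id[i]
--             # 如果没有碰撞，更新路径和起点
--             if my_pos not in others_pos:
--                 start = my_pos
--                 path_for_return.append(my_pos)
--                 cost += 1
--             else: break
--         # 如果滤遍了计划，还是没有碰：返回完整的计划和时间
--         return start, path_for_return, cost
--     else: # path为空的场合
--         start = current_pos
--         path_for_return = []
--         cost = 0
--         return start, path_for_return, cost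
-- ===== SOURCE B (Python) =====
-- def init_algo(current_pos, path, plan_no_id):
--     if path and not plan_no_id:
--         return path[-1], path, len(path) - 1
--     # staged: collect ALL collision indices, cut at the smallest one
--     hits = [i for i, (p, o) in enumerate(zip(path, plan_no_id)) if p in o]
--     k = hits[0] if hits else min(len(path), len(plan_no_id))
--     pruned = path[:k]
--     return (pruned[-1] if pruned else current_pos), pruned, k
-- ===== Notes on version B (the rewrite author's own statement) =====
-- stated objective: alternative
-- what changed: B replaces A's early-exit stateful loop (break on first collision, appending and tracking start/cost) by a staged full pass: it first collects the complete list of collision indices via a comprehension over enumerate(zip(path, plan_no_id)), cuts at the minimum hit (or the shorter length), slices path[:k], and derives start and cost from that slice.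
import Mathlib
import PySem

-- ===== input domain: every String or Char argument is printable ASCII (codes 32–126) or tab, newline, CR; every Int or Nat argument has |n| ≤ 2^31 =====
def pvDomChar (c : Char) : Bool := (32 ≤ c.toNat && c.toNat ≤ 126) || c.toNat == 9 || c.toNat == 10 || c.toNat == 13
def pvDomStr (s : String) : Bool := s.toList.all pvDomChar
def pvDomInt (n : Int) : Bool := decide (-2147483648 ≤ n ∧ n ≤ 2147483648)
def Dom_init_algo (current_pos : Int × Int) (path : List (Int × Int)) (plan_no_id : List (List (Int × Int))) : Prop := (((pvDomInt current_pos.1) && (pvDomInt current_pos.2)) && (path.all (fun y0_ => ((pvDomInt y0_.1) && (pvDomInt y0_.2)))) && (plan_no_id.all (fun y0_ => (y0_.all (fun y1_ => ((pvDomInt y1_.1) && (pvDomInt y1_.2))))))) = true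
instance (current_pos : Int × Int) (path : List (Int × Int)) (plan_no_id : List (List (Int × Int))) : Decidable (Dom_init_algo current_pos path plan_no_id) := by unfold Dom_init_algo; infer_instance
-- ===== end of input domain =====

-- B replaces A's early-exit stateful loop by a staged full pass (collect all collision
-- indices, cut at the minimum, slice); same value, alternative decomposition (no speed claim).

-- ===== PORT A =====
-- A's for-loop over range(min(len,len)) indexing path[i] and plan_no_id[i] with a break,
-- carrying mutable state (start, path_for_return, cost): ported as structural recursion
-- over the two lists in step, with the same state.
def initLoopA : List (Int × Int) → List (List (Int × Int)) →
    (Int × Int) → List (Int × Int) → Int → (Int × Int) × (List (Int × Int)) × Int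
  | [], _, start, acc, cost => (start, acc, cost)
  | _ :: _, [], start, acc, cost => (start, acc, cost)
  | p :: ps, o :: os, start, acc, cost =>
      if p ∈ o then (start, acc, cost)          -- break
      else initLoopA ps os p (acc ++ [p]) (cost + 1)

def init_algo (current_pos : Int × Int) (path : List (Int × Int)) (plan_no_id : List (List (Int × Int))) : (Int × Int) × (List (Int × Int)) × Int :=
  if path ≠ [] ∧ plan_no_id = [] then
    ((PySem.List.pyGet? path (-1)).getD (0, 0), path, (path.length : Int) - 1)
  else if path ≠ [] ∧ plan_no_id ≠ [] then
    initLoopA path plan_no_id current_pos [] 0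
  else
    (current_pos, [], 0)

-- ===== PORT B =====
-- hits = [i for i, (p, o) in enumerate(zip(path, plan_no_id)) if p in o]
-- k = hits[0] if hits else min(len(path), len(plan_no_id)); pruned = path[:k]
def init_algo_alt (current_pos : Int × Int) (path : List (Int × Int)) (plan_no_id : List (List (Int × Int))) : (Int × Int) × (List (Int × Int)) × Int :=
  if path ≠ [] ∧ plan_no_id = [] then
    ((PySem.List.pyGet? path (-1)).getD (0, 0), path, (path.length : Int) - 1)
  else
    let hits : List Int :=
      (PySem.List.enumerate (path.zip plan_no_id) 0).filterMap
        (fun pr => if pr.2.1 ∈ pr.2.2 then some pr.1 else none)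
    let k : Int := hits.head?.getD (min path.length plan_no_id.length : Int)
    let pruned := PySem.List.slice path none (some k)
    ((if pruned ≠ [] then (PySem.List.pyGet? pruned (-1)).getD (0, 0) else current_pos),
      pruned, k)

-- ===== PRECONDITION & SPEC =====
def Spec_init_algo (current_pos : Int × Int) (path : List (Int × Int)) (plan_no_id : List (List (Int × Int))) (out : (Int × Int) × (List (Int × Int)) × Int) : Prop := out = init_algo_alt current_pos path plan_no_id
instance (current_pos : Int × Int) (path : List (Int × Int)) (plan_no_id : List (List (Int × Int))) (out : (Int × Int) × (List (Int × Int)) × Int) : Decidable (Spec_init_algo current_pos path plan_no_id out) := by unfold Spec_init_algo; infer_instance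

-- ===== CLAIM (what is proved, stated in full; the proofs are below) =====
def Claim_equal_init_algo : Prop := ∀ (current_pos : Int × Int) (path : List (Int × Int)) (plan_no_id : List (List (Int × Int))), Dom_init_algo current_pos path plan_no_id → Spec_init_algo current_pos path plan_no_id (init_algo current_pos path plan_no_id)

-- ===== LEMMAS AND PROOFS =====
-- index of the first i with ps[i] ∈ os[i], defaulting to min of the lengths (proof device)
def firstHit : List (Int × Int) → List (List (Int × Int)) → Nat
  | [], _ => 0
  | _ :: _, [] => 0
  | p :: ps, o :: os => if p ∈ o then 0 else firstHit ps os + 1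

theorem firstHit_le (ps : List (Int × Int)) (os : List (List (Int × Int))) :
    firstHit ps os ≤ min ps.length os.length := by
  induction ps generalizing os with
  | nil => simp [firstHit]
  | cons p ps ih =>
    cases os with
    | nil => simp [firstHit]
    | cons o os =>
      by_cases h : p ∈ o
      · simp [firstHit, h]
      · simp only [firstHit, if_neg h, List.length_cons]
        have := ih os; omega

theorem initLoopA_eq (ps : List (Int × Int)) (os : List (List (Int × Int)))
    (s : Int × Int) (acc : List (Int × Int)) (c : Int) :
    initLoopA ps os s acc c =
      ((if firstHit ps os = 0 then s else ps.getD (firstHit ps os - 1) (0, 0)),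
        acc ++ ps.take (firstHit ps os), c + (firstHit ps os : Int)) := by
  induction ps generalizing os s acc c with
  | nil => cases os <;> simp [initLoopA, firstHit]
  | cons p ps ih =>
    cases os with
    | nil => simp [initLoopA, firstHit]
    | cons o os =>
      by_cases h : p ∈ o
      · simp [initLoopA, firstHit, h]
      · simp only [initLoopA, firstHit, if_neg h]
        rw [ih]
        simp only [Nat.add_sub_cancel]
        cases hk : firstHit ps os with
        | zero => simp [List.take, List.getD]
        | succ k =>
          simp [List.take]
          omega

-- head of the collected hit indices, with default, equals the first-hit index
theorem hits_head (ps : List (Int × Int)) (os : List (List (Int × Int))) (s : Int) :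
    (((PySem.List.enumerate (ps.zip os) s).filterMap
        (fun pr => if pr.2.1 ∈ pr.2.2 then some pr.1 else none)).head?).getD
      (s + (min ps.length os.length : Int)) = s + (firstHit ps os : Int) := by
  induction ps generalizing os s with
  | nil => simp [firstHit]
  | cons p ps ih =>
    cases os with
    | nil => simp [firstHit]; positivity
    | cons o os =>
      by_cases h : p ∈ o
      · simp [PySem.List.enumerate_cons, firstHit, h]
      · simp only [List.zip_cons_cons, PySem.List.enumerate_cons, List.filterMap_cons,
          if_neg h, firstHit, List.length_cons]
        have hih := ih os (s + 1)
        push_cast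
        rw [(by omega : s + min ((ps.length : Int) + 1) ((os.length : Int) + 1) =
              (s + 1) + min (ps.length : Int) (os.length : Int)), hih]
        ring

theorem getLast_take (xs : List (Int × Int)) (k : Nat) (h1 : 0 < k) (h2 : k ≤ xs.length) :
    ((xs.take k).getLast?).getD (0, 0) = xs.getD (k - 1) (0, 0) := by
  have hlen : (xs.take k).length = k := by simp; omega
  have hne : xs.take k ≠ [] := by
    intro he; rw [he] at hlen; simp at hlen; omega
  rw [List.getLast?_eq_getElem?, hlen, List.getElem?_take, if_pos (by omega),
    List.getD_eq_getElem?_getD]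

theorem init_algo_spec : Claim_equal_init_algo := by
  intro cp path plan _
  unfold Spec_init_algo init_algo init_algo_alt
  by_cases h1 : path ≠ [] ∧ plan = []
  · simp only [if_pos h1]
  · simp only [if_neg h1]
    have hk := hits_head path plan 0
    simp only [zero_add] at hk
    by_cases h2 : path ≠ [] ∧ plan ≠ []
    · simp only [if_pos h2]
      rw [initLoopA_eq]
      simp only [List.nil_append, zero_add]
      rw [hk, PySem.List.slice_to_natCast]
      have hle : firstHit path plan ≤ min path.length plan.length := firstHit_le path plan
      cases hfh : firstHit path plan with
      | zero => simp
      | succ k =>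
        rw [hfh] at hle
        have hlp : k + 1 ≤ path.length := hle.trans (Nat.min_le_left _ _)
        have hne : path.take (k + 1) ≠ [] :=
          List.ne_nil_of_length_pos (by rw [List.length_take]; omega)
        simp only [Nat.succ_ne_zero, ne_eq, not_false_eq_true, hne, if_pos, reduceIte]
        rw [PySem.List.pyGet?_neg_one, getLast_take path (k + 1) (by omega) hlp]
    · -- path = [] (since h1 failed with plan = [] or not; if path ≠ [] then from ¬h1, plan ≠ [], contradiction with ¬h2)
      have hp : path = [] := by
        by_contra hpne
        exact h2 ⟨hpne, fun hpl => h1 ⟨hpne, hpl⟩⟩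
      subst hp
      simp [PySem.List.slice]
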